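-- pv_equiv track=rewrite | github.com/EshaanAgg/DPBH | api/translation_unit.py | count_letters_and_symbols
-- ===== SOURCE A (Python) =====
-- import string
--
-- def count_letters_and_symbols(text):
--     english_alphabets = set(string.ascii_lowercase)
--     english_count = 0
--     symbol_count = 0
--
--     for char in text.lower():
--         if char in english_alphabets:
--             english_count += 1
--         elif char in string.punctuation or char in string.digits:
--             symbol_count += 1
--
--     return english_count, symbol_count
-- ===== SOURCE B (Python) =====
-- import string
--
-- def count_letters_and_symbols(text):
--     # Build a frequency histogram once, then project it onto the fixed
--     # alphabets instead of branching per character of the text.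
--     counts = {}
--     for ch in text.lower():
--         counts[ch] = counts.get(ch, 0) + 1
--
--     english_count = sum(counts.get(c, 0) for c in string.ascii_lowercase)
--     symbol_count = sum(counts.get(c, 0) for c in string.punctuation + string.digits)
--     return english_count, symbol_count
-- ===== Notes on version B (the rewrite author's own statement) =====
-- stated objective: alternative
-- what changed: Replaces the per-character if/elif classification scan with a histogram pass (dict of character frequencies) followed by projections that sum the histogram over the fixed letter and punctuation+digit alphabets.
import Mathlib
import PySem

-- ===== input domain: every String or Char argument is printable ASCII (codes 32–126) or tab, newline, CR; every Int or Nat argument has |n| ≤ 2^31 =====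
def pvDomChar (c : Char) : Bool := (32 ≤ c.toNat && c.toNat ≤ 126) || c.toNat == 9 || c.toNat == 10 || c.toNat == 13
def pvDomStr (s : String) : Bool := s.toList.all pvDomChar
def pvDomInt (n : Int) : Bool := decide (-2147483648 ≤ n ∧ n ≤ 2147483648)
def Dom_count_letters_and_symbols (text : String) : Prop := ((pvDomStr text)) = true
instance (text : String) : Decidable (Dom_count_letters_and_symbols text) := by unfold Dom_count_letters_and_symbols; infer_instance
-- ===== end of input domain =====

set_option maxRecDepth 10000

-- B replaces A's per-character if/elif classification scan with a frequency
-- histogram of the lowered text projected onto the fixed alphabets (alternative decomposition, same cost).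

-- string.ascii_lowercase, string.punctuation, string.digits (module constants)
def pvLowerChars : List Char := "abcdefghijklmnopqrstuvwxyz".toList
def pvPunctChars : List Char := "!\"#$%&'()*+,-./:;<=>?@[\\]^_`{|}~".toList
def pvDigitChars : List Char := "0123456789".toList

-- ===== PORT A =====
def count_letters_and_symbols (text : String) : Int × Int :=
  let english_alphabets : PySem.Set Char := PySem.Set.ofList pvLowerChars
  (PySem.Str.lower text).toList.foldl
    (fun (st : Int × Int) char =>
      if english_alphabets.contains char then (st.1 + 1, st.2)
      else if pvPunctChars.contains char || pvDigitChars.contains char then (st.1, st.2 + 1)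
      else st) (0, 0)

-- ===== PORT B =====
def count_letters_and_symbols_alt (text : String) : Int × Int :=
  let counts : PySem.Dict Char Int :=
    (PySem.Str.lower text).toList.foldl
      (fun d ch => d.insert ch (d.getD ch 0 + 1)) PySem.Dict.empty
  let english_count := (pvLowerChars.map (fun c => counts.getD c 0)).sum
  let symbol_count := ((pvPunctChars ++ pvDigitChars).map (fun c => counts.getD c 0)).sum
  (english_count, symbol_count)

-- ===== PRECONDITION & SPEC =====
def Spec_count_letters_and_symbols (text : String) (out : Int × Int) : Prop := out = count_letters_and_symbols_alt text
instance (text : String) (out : Int × Int) : Decidable (Spec_count_letters_and_symbols text out) := by unfold Spec_count_letters_and_symbols; infer_instance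

-- ===== CLAIM (what is proved, stated in full; the proofs are below) =====
def Claim_equal_count_letters_and_symbols : Prop := ∀ (text : String), Dom_count_letters_and_symbols text → Spec_count_letters_and_symbols text (count_letters_and_symbols text)

-- ===== LEMMAS AND PROOFS =====

-- the three alphabets are duplicate-free, and punctuation/digits are disjoint from the letters
theorem pv_nodup_lower : pvLowerChars.Nodup := by decide

theorem pv_nodup_symbols : (pvPunctChars ++ pvDigitChars).Nodup := by decide

theorem pv_disj : ∀ c ∈ pvPunctChars ++ pvDigitChars, c ∉ pvLowerChars := by
  have h : ((pvPunctChars ++ pvDigitChars).all (fun c => !(pvLowerChars.contains c))) = true := by rfl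
  intro c hc
  have := List.all_eq_true.mp h c hc
  simpa using this

-- summing a histogram over a duplicate-free alphabet counts the members of that alphabet
theorem pv_sum_count (alpha : List Char) (h : alpha.Nodup) (l : List Char) :
    (alpha.map (fun c => (l.count c : Int))).sum = (l.countP (fun c => decide (c ∈ alpha)) : Int) := by
  induction l with
  | nil => simp
  | cons x l ih =>
    have h1 : (alpha.map (fun c => ((x :: l).count c : Int))).sum
        = (alpha.map (fun c => (l.count c : Int))).sum
          + (alpha.map (fun c => if (c == x) = true then (1 : Int) else 0)).sum := by
      rw [← PySem.List.sum_map_add_int]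
      apply congrArg
      apply List.map_congr_left
      intro c _
      simp [List.count_cons, BEq.comm]
    rw [h1, ih, PySem.List.sum_map_ite_one_zero]
    have h2 : alpha.countP (fun c => c == x) = alpha.count x := rfl
    rw [h2, List.countP_cons]
    by_cases hx : x ∈ alpha
    · rw [List.count_eq_one_of_mem h hx]; simp [hx]
    · rw [List.count_eq_zero_of_not_mem hx]; simp [hx]

-- A's fold accumulates the two membership counts
theorem pv_foldA (l : List Char) (e s : Int) :
    l.foldl
      (fun (st : Int × Int) char =>
        if (PySem.Set.ofList pvLowerChars).contains char then (st.1 + 1, st.2)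
        else if pvPunctChars.contains char || pvDigitChars.contains char then (st.1, st.2 + 1)
        else st) (e, s)
    = (e + (l.countP (fun c => decide (c ∈ pvLowerChars)) : Int),
       s + (l.countP (fun c => decide (c ∈ pvPunctChars ++ pvDigitChars)) : Int)) := by
  induction l generalizing e s with
  | nil => simp
  | cons x l ih =>
    rw [List.foldl_cons]
    by_cases h1 : x ∈ pvLowerChars
    · have hc1 : (PySem.Set.ofList pvLowerChars).contains x = true :=
        (PySem.Set.contains_iff _ _).mpr ((PySem.Set.mem_ofList _ _).mpr h1)
      have h2 : x ∉ pvPunctChars ++ pvDigitChars := fun hm => pv_disj x hm h1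
      rw [if_pos hc1, ih]
      simp only [List.countP_cons, decide_eq_true h1, decide_eq_false h2]
      simp [Prod.ext_iff]
      omega
    · have hc1 : ¬ ((PySem.Set.ofList pvLowerChars).contains x = true) := by
        rw [PySem.Set.contains_iff, PySem.Set.mem_ofList]; exact h1
      rw [if_neg hc1]
      by_cases h2 : x ∈ pvPunctChars ++ pvDigitChars
      · have hc2 : (pvPunctChars.contains x || pvDigitChars.contains x) = true := by
          simpa [List.mem_append] using h2
        rw [if_pos hc2, ih]
        simp only [List.countP_cons, decide_eq_false h1, decide_eq_true h2]
        simp [Prod.ext_iff]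
        omega
      · have hc2 : ¬ ((pvPunctChars.contains x || pvDigitChars.contains x) = true) := by
          simpa [List.mem_append] using h2
        rw [if_neg hc2, ih]
        simp only [List.countP_cons, decide_eq_false h1, decide_eq_false h2]
        simp

-- ===== VERDICT (by name: the statement is the Claim_ definition above) =====
theorem count_letters_and_symbols_spec : Claim_equal_count_letters_and_symbols := by
  intro text _
  unfold Spec_count_letters_and_symbols count_letters_and_symbols count_letters_and_symbols_alt
  simp only [PySem.Dict.getD_foldl_insert_add_one, PySem.Dict.getD_empty, zero_add]
  rw [pv_foldA, pv_sum_count _ pv_nodup_lower, pv_sum_count _ pv_nodup_symbols]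
  simp
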